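-- pv_equiv track=rewrite | github.com/hyjump/Nonogram-Solver | nonogram/solver.py | _intersect_candidates
-- ===== SOURCE A (Python) =====
-- from typing import Callable, List, Optional, Tuple
--
-- UNKNOWN = -1
--
-- def _intersect_candidates(candidates: Tuple[Tuple[int, ...], ...]) -> List[int]:
--     if not candidates:
--         return []
--     length = len(candidates[0])
--     result = [UNKNOWN] * length
--     for i in range(length):
--         v = candidates[0][i]
--         same = True
--         for cand in candidates[1:]:
--             if cand[i] != v:
--                 same = False
--                 break
--         result[i] = v if same else UNKNOWN
--     return result
-- ===== SOURCE B (Python) =====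
-- UNKNOWN = -1
--
-- def _merge(acc, row):
--     return [a if a == b else UNKNOWN for a, b in zip(acc, row)]
--
-- def _intersect_candidates(candidates):
--     it = iter(candidates)
--     try:
--         acc = list(next(it))
--     except StopIteration:
--         return []
--     for row in it:
--         acc = _merge(acc, row)
--     return acc
-- ===== Notes on version B (the rewrite author's own statement) =====
-- stated objective: alternative
-- what changed: Replaces the column-major nested scan (for each index, scan all later rows for a mismatch) by a row-major left fold: a running accumulator starts as the first row and is pairwise-merged with each subsequent row, a cell collapsing to UNKNOWN on the first disagreement and UNKNOWN being absorbing.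
-- outside the precondition, e.g. on _intersect_candidates(((0, 1), (9, 9), (0,))): A returns [-1, -1], B returns [-1]; on _intersect_candidates(((1, 2, 3), (1, 2))): A raises IndexError, B returns [1, 2]
import Mathlib
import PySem

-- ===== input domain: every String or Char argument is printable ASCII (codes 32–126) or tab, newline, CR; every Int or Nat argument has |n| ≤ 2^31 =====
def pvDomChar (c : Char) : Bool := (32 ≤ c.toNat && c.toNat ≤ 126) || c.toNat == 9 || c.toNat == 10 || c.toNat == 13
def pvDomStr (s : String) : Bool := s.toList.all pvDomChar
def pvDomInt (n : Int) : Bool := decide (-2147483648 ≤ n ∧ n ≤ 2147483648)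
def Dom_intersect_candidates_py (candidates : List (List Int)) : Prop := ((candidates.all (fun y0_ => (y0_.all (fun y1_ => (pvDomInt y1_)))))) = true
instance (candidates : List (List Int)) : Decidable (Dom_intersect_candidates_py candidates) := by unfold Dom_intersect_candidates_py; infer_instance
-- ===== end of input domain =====

-- B replaces A's column-major nested scan by a row-major left fold with a pairwise-merge
-- accumulator (UNKNOWN absorbing); alternative decomposition, same asymptotic cost.

-- ===== PORT A =====
-- inner 'for cand in candidates[1:]: if cand[i] != v: same = False; break'
def intersectInner : List (List Int) → Int → Int → Bool
  | [], _, _ => true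
  | c :: rest, i, v =>
    match PySem.List.pyGet? c i with
    | some x => if x ≠ v then false else intersectInner rest i v
    | none => false      -- Python would raise IndexError here; excluded by Pre_

def intersect_candidates_py (candidates : List (List Int)) : List Int :=
  match candidates with
  | [] => []
  | c0 :: rest =>
    (PySem.List.pyRange 0 c0.length 1).map (fun i =>
      match PySem.List.pyGet? c0 i with
      | some v => if intersectInner rest i v then v else -1
      | none => -1)

-- ===== PORT B =====
-- '[a if a == b else UNKNOWN for a, b in zip(acc, row)]'
def mergeRow (acc row : List Int) : List Int :=
  (acc.zip row).map (fun p => if p.1 = p.2 then p.1 else -1)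

def intersect_candidates_py_alt (candidates : List (List Int)) : List Int :=
  match candidates with
  | [] => []
  | c0 :: rest => rest.foldl mergeRow c0

-- ===== PRECONDITION & SPEC =====
-- Pre_ excludes candidate lists with a row shorter than the first row (the domain guarantees equal
-- lengths): there A raises IndexError unless an earlier mismatch breaks out first, and when it does
-- return, its first-row-length scan and B's zip truncation are both defensible readings of ragged input.
def Pre_intersect_candidates_py (candidates : List (List Int)) : Prop :=
  ∀ c ∈ candidates, (candidates.headD []).length ≤ c.length
instance (candidates : List (List Int)) : Decidable (Pre_intersect_candidates_py candidates) := by unfold Pre_intersect_candidates_py; infer_instance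
def pvWitness_intersect_candidates_py : List (List Int) := [[1, 2, -1], [1, 0, -1]]

def Spec_intersect_candidates_py (candidates : List (List Int)) (out : List Int) : Prop := out = intersect_candidates_py_alt candidates
instance (candidates : List (List Int)) (out : List Int) : Decidable (Spec_intersect_candidates_py candidates out) := by unfold Spec_intersect_candidates_py; infer_instance

-- ===== CLAIM (what is proved, stated in full; the proofs are below) =====
def Claim_equal_intersect_candidates_py : Prop := ∀ (candidates : List (List Int)), Dom_intersect_candidates_py candidates → Pre_intersect_candidates_py candidates → Spec_intersect_candidates_py candidates (intersect_candidates_py candidates)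

-- ===== LEMMAS AND PROOFS =====

theorem mergeRow_length (a r : List Int) : (mergeRow a r).length = min a.length r.length := by
  simp [mergeRow]

theorem mergeRow_getD (a r : List Int) (i : Nat) (hi : i < a.length) (hr : i < r.length) :
    (mergeRow a r).getD i 0 = if a.getD i 0 = r.getD i 0 then a.getD i 0 else -1 := by
  have hlen : i < (mergeRow a r).length := by rw [mergeRow_length]; omega
  rw [List.getD_eq_getElem _ _ hlen, List.getD_eq_getElem _ _ hi, List.getD_eq_getElem _ _ hr]
  simp [mergeRow]

theorem fold_length (c0 : List Int) (rest : List (List Int))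
    (hlen : ∀ c ∈ rest, c0.length ≤ c.length) :
    (rest.foldl mergeRow c0).length = c0.length := by
  induction rest generalizing c0 with
  | nil => rfl
  | cons r rs ih =>
    have hr : c0.length ≤ r.length := hlen r (by simp)
    have hm : (mergeRow c0 r).length = c0.length := by rw [mergeRow_length]; omega
    rw [List.foldl_cons, ih (mergeRow c0 r) (fun c hc => hm ▸ hlen c (by simp [hc])), hm]

theorem fold_getD (c0 : List Int) (rest : List (List Int)) (i : Nat)
    (hi : i < c0.length) (hlen : ∀ c ∈ rest, c0.length ≤ c.length) :
    (rest.foldl mergeRow c0).getD i 0 =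
      if ∀ c ∈ rest, c.getD i 0 = c0.getD i 0 then c0.getD i 0 else -1 := by
  induction rest generalizing c0 with
  | nil => rw [List.foldl_nil, if_pos (by simp)]
  | cons r rs ih =>
    have hr : c0.length ≤ r.length := hlen r (by simp)
    have hm : (mergeRow c0 r).length = c0.length := by rw [mergeRow_length]; omega
    have ih' := ih (mergeRow c0 r) (hm ▸ hi)
      (fun c hc => hm ▸ hlen c (by simp [hc]))
    have hmget : (mergeRow c0 r).getD i 0 =
        if c0.getD i 0 = r.getD i 0 then c0.getD i 0 else -1 :=
      mergeRow_getD c0 r i hi (by omega)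
    rw [List.foldl_cons, ih', hmget]
    by_cases hre : c0.getD i 0 = r.getD i 0
    · rw [if_pos hre]
      have hiff : (∀ c ∈ r :: rs, c.getD i 0 = c0.getD i 0) ↔
          (∀ c ∈ rs, c.getD i 0 = c0.getD i 0) := by
        rw [List.forall_mem_cons]
        exact and_iff_right hre.symm
      exact if_congr hiff.symm rfl rfl
    · rw [if_neg hre]
      rw [if_neg (show ¬ ∀ c ∈ r :: rs, c.getD i 0 = c0.getD i 0 from
        fun h => hre (h r (by simp)).symm)]
      split_ifs <;> rfl

theorem inner_iff (rest : List (List Int)) (i : Nat) (v : Int)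
    (hlen : ∀ c ∈ rest, i < c.length) :
    intersectInner rest (i : Int) v = true ↔ ∀ c ∈ rest, c.getD i 0 = v := by
  induction rest with
  | nil => simp [intersectInner]
  | cons c t ih =>
    have hc : i < c.length := hlen c (by simp)
    have hget : PySem.List.pyGet? c (i : Int) = some (c.getD i 0) := by
      rw [PySem.List.pyGet?_natCast, List.getElem?_eq_getElem hc, List.getD_eq_getElem _ _ hc]
    have ih' := ih (fun d hd => hlen d (by simp [hd]))
    simp only [intersectInner, hget, List.forall_mem_cons]
    by_cases hv : c.getD i 0 = v
    · rw [if_neg (not_not_intro hv), ih']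
      exact (and_iff_right hv).symm
    · rw [if_pos hv]
      simp only [Bool.false_eq_true, false_iff]
      exact fun h => hv h.1

theorem main_eq (c0 : List Int) (rest : List (List Int))
    (hlen : ∀ c ∈ rest, c0.length ≤ c.length) :
    intersect_candidates_py (c0 :: rest) = rest.foldl mergeRow c0 := by
  have hAlen : (intersect_candidates_py (c0 :: rest)).length = c0.length := by
    simp [intersect_candidates_py, PySem.List.length_pyRange_one]
  have hBlen := fold_length c0 rest hlen
  apply List.ext_getElem (by rw [hAlen, hBlen])
  intro k hk1 hk2
  have hkc : k < c0.length := by omega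
  -- A side
  have hrange : k < (PySem.List.pyRange 0 (c0.length : Int) 1).length := by
    rw [PySem.List.length_pyRange_one]; omega
  have hA : (intersect_candidates_py (c0 :: rest))[k] =
      (match PySem.List.pyGet? c0 ((k : Int)) with
       | some v => if intersectInner rest ((k : Int)) v then v else -1
       | none => -1) := by
    show ((PySem.List.pyRange 0 (c0.length : Int) 1).map _)[k] = _
    rw [List.getElem_map, PySem.List.getElem_pyRange_one]
    norm_num
  have hget : PySem.List.pyGet? c0 ((k : Int)) = some (c0.getD k 0) := by
    rw [PySem.List.pyGet?_natCast, List.getElem?_eq_getElem hkc, List.getD_eq_getElem _ _ hkc]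
  rw [hA, hget]
  -- B side
  have hB : (rest.foldl mergeRow c0)[k] =
      (if ∀ c ∈ rest, c.getD k 0 = c0.getD k 0 then c0.getD k 0 else -1) := by
    rw [← List.getD_eq_getElem _ 0 hk2]
    exact fold_getD c0 rest k hkc hlen
  rw [hB]
  have hinner := inner_iff rest k (c0.getD k 0) (fun c hc => lt_of_lt_of_le hkc (hlen c hc))
  simp only []
  split_ifs with h1 h2 h2
  · rfl
  · exact absurd (hinner.mp h1) h2
  · exact absurd (hinner.mpr h2) h1
  · rfl

-- ===== VERDICT (by name: the statement is the Claim_ definition above) =====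
theorem intersect_candidates_py_spec : Claim_equal_intersect_candidates_py := by
  intro candidates _ hpre
  unfold Spec_intersect_candidates_py
  cases candidates with
  | nil => rfl
  | cons c0 rest =>
    exact main_eq c0 rest (fun c hc => hpre c (by simp [hc]))
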